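-- pv_equiv track=rewrite | github.com/Teyeray/leetcode | huawei_A_2025/max_split_difference/max_split_difference.py | find_max_split_difference
-- ===== SOURCE A (Python) =====
-- def find_max_split_difference(nums):
--     n = len(nums)
--     max_left = 0
--     max_right = 0
--     for i in range(n):
--         left_sum = sum(nums[:i])
--         right_sum = sum(nums[i:])
--         if right_sum >= max_right and -left_sum >= max_left:
--             max_right = right_sum
--             max_left = -left_sum
--     return max_left, max_right
-- ===== SOURCE B (Python) =====
-- def find_max_split_difference(nums):
--     total = sum(nums)
--     max_left = 0
--     max_right = 0
--     left = 0
--     for x in nums: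
--         right = total - left
--         if right >= max_right and -left >= max_left:
--             max_right = right
--             max_left = -left
--         left += x
--     return max_left, max_right
-- ===== Notes on version B (the rewrite author's own statement) =====
-- stated objective: faster
-- what changed: Replaces the per-index recomputation of sum(nums[:i]) and sum(nums[i:]) by a single pass that maintains a running prefix sum and derives the suffix sum from the precomputed total.
import Mathlib
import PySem

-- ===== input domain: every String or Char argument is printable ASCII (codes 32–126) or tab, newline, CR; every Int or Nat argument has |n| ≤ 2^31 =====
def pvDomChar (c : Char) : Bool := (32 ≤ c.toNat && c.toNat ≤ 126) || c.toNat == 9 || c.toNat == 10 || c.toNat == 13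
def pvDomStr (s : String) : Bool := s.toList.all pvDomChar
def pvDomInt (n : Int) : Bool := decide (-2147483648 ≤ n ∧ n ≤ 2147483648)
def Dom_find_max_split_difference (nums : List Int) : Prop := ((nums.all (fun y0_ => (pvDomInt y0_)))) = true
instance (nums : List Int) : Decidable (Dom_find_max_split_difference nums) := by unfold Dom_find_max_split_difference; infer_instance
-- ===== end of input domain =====

-- B replaces A's quadratic per-index slice sums by one pass with a running prefix sum (faster, asymptotic).
-- ===== PORT A =====
def find_max_split_difference (nums : List Int) : Int × Int :=
  let n : Int := nums.length
  (PySem.List.pyRange 0 n 1).foldl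
    (fun (st : Int × Int) i =>
      let left_sum := (PySem.List.slice nums none (some i)).sum
      let right_sum := (PySem.List.slice nums (some i) none).sum
      if right_sum ≥ st.2 ∧ -left_sum ≥ st.1 then (-left_sum, right_sum) else st)
    (0, 0)

-- ===== PORT B =====
def find_max_split_difference_alt (nums : List Int) : Int × Int :=
  let total := nums.sum
  (nums.foldl
    (fun (st : Int × (Int × Int)) x =>
      let left := st.1
      let right := total - left
      let st' := if right ≥ st.2.2 ∧ -left ≥ st.2.1 then (-left, right) else st.2
      (left + x, st'))
    (0, (0, 0))).2

-- ===== PRECONDITION & SPEC =====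
def Spec_find_max_split_difference (nums : List Int) (out : Int × Int) : Prop := out = find_max_split_difference_alt nums
instance (nums : List Int) (out : Int × Int) : Decidable (Spec_find_max_split_difference nums out) := by unfold Spec_find_max_split_difference; infer_instance

-- ===== CLAIM (what is proved, stated in full; the proofs are below) =====
def Claim_equal_find_max_split_difference : Prop := ∀ (nums : List Int), Dom_find_max_split_difference nums → Spec_find_max_split_difference nums (find_max_split_difference nums)

-- ===== LEMMAS AND PROOFS =====

lemma pv_key (nums : List Int) : ∀ (xs pre : List Int) (st : Int × Int),
    pre ++ xs = nums →
    (PySem.List.pyRange (pre.length : Int) (nums.length : Int) 1).foldl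
      (fun (st : Int × Int) i =>
        let left_sum := (PySem.List.slice nums none (some i)).sum
        let right_sum := (PySem.List.slice nums (some i) none).sum
        if right_sum ≥ st.2 ∧ -left_sum ≥ st.1 then (-left_sum, right_sum) else st)
      st
    = (xs.foldl
        (fun (st : Int × (Int × Int)) x =>
          let left := st.1
          let right := nums.sum - left
          let st' := if right ≥ st.2.2 ∧ -left ≥ st.2.1 then (-left, right) else st.2
          (left + x, st'))
        (pre.sum, st)).2 := by
  intro xs
  induction xs with
  | nil =>
      intro pre st h
      have hlen : pre.length = nums.length := by rw [← h]; simp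
      rw [hlen, PySem.List.pyRange_one_eq_nil le_rfl]
      simp
  | cons x xs ih =>
      intro pre st h
      have hlt : (pre.length : Int) < (nums.length : Int) := by
        rw [← h]; simp
      rw [PySem.List.pyRange_one_cons hlt]
      rw [List.foldl_cons]
      have htake : PySem.List.slice nums none (some (pre.length : Int)) = pre := by
        rw [PySem.List.slice_to_natCast, ← h, List.take_left]
      have hdrop : PySem.List.slice nums (some (pre.length : Int)) none = x :: xs := by
        rw [PySem.List.slice_from_natCast, ← h, List.drop_left]
      have hsum : (x :: xs).sum = nums.sum - pre.sum := by
        rw [← h]; simp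
      have hcast : (pre.length : Int) + 1 = ((pre ++ [x]).length : Int) := by
        simp
      rw [htake, hdrop, hsum, hcast, ih (pre ++ [x]) _ (by simp [← h])]
      simp [List.foldl_cons]

-- ===== VERDICT (by name: the statement is the Claim_ definition above) =====
theorem find_max_split_difference_spec : Claim_equal_find_max_split_difference := by
  intro nums _
  unfold Spec_find_max_split_difference find_max_split_difference find_max_split_difference_alt
  have := pv_key nums nums [] (0, 0) (by simp)
  simpa using this
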